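-- pv_equiv track=rewrite | github.com/CL221057-SandeepSingh/NLP-AIML-3RD-YEAR | Task 1 alignment function.py | all_alignment
-- ===== SOURCE A (Python) =====
-- def all_alignment(l,m):
--     Range = (1+l)**m
--     Keys = [i for i in range(1,m+1)]
--     alignment = list()
--     d = l+1
--     for i in range(Range):
--         n = i
--         q = int()
--         r = int()
--         one_alignment = list()
--         for j in range(m):
--             q = n // d
--             r = n % d
--             one_alignment.append(r)
--             n = q
--         one_alignment = one_alignment[::-1]
--         one_alignment = dict(zip(Keys , one_alignment))
--         alignment.append(one_alignment)
--     return alignment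
-- ===== SOURCE B (Python) =====
-- def all_alignment(l, m):
--     # Cartesian-product construction: extend each partial row by every value
--     # 0..l, m times, in lexicographic (counting) order; no digit arithmetic.
--     vals = list(range(l + 1))
--     rows = [[]]
--     for _ in range(m):
--         rows = [row + [v] for row in rows for v in vals]
--     keys = list(range(1, m + 1))
--     return [dict(zip(keys, row)) for row in rows]
-- ===== Notes on version B (the rewrite author's own statement) =====
-- stated objective: alternative
-- what changed: B builds the result as an iterative Cartesian product, extending every partial row by each value 0..l for m rounds, instead of A's per-index base-(l+1) division/modulo digit extraction with a reverse.
-- outside the precondition, e.g. on all_alignment(-2, 2): A returns [{1: 0, 2: 0}], B returns []; on all_alignment(2, -1): A raises TypeError, B returns [{}]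
import Mathlib
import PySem

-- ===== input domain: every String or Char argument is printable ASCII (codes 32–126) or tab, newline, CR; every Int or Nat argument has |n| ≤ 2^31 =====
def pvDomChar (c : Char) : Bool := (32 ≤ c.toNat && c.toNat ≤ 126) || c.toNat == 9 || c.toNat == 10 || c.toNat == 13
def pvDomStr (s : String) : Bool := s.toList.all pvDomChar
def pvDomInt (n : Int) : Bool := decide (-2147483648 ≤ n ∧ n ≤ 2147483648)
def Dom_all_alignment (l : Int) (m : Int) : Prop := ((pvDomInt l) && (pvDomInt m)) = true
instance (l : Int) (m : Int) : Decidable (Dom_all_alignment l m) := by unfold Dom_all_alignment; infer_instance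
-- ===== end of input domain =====

-- B replaces A's base-(l+1) division/modulo digit extraction by an iterative
-- Cartesian-product construction (alternative decomposition, same cost).
-- Pre_ excludes negative m, on which A raises TypeError, and l ≤ -2 with even m ≥ 2,
-- where A's digit arithmetic on a non-positive base yields accidental negative "digits".


-- ===== PORT A =====
def all_alignment (l : Int) (m : Int) : List (List (Int × Int)) :=
  let Range : Int := (1 + l) ^ m.toNat
  let Keys : List Int := PySem.List.pyRange 1 (m + 1) 1
  let d : Int := l + 1
  (PySem.List.pyRange 0 Range 1).foldl (fun alignment i =>
    let st :=
      (PySem.List.pyRange 0 m 1).foldl (fun (st : Int × List Int) _ =>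
        let q := PySem.Int.floordiv st.1 d
        let r := PySem.Int.mod st.1 d
        (q, st.2 ++ [r])) (i, [])
    let one_alignment := Keys.zip st.2.reverse
    alignment ++ [one_alignment]) []

-- ===== PORT B =====
def all_alignment_alt (l : Int) (m : Int) : List (List (Int × Int)) :=
  let vals : List Int := PySem.List.pyRange 0 (l + 1) 1
  let rows : List (List Int) :=
    (PySem.List.pyRange 0 m 1).foldl
      (fun rows _ => rows.flatMap (fun row => vals.map (fun v => row ++ [v]))) [[]]
  let keys : List Int := PySem.List.pyRange 1 (m + 1) 1
  rows.map (fun row => keys.zip row)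

-- ===== PRECONDITION & SPEC =====
-- Pre_ excludes m < 0 (A raises TypeError: range() on a float) and l ≤ -2 with even m ≥ 2,
-- the only inputs where A's base-(l+1) digit loop on a non-positive base returns accidental negative "digits".
def Pre_all_alignment (l : Int) (m : Int) : Prop := 0 ≤ m ∧ (-1 ≤ l ∨ m = 0 ∨ m % 2 = 1)
instance (l : Int) (m : Int) : Decidable (Pre_all_alignment l m) := by unfold Pre_all_alignment; infer_instance
def pvWitness_all_alignment : Int × Int := (2, 2)
def Spec_all_alignment (l : Int) (m : Int) (out : List (List (Int × Int))) : Prop := out = all_alignment_alt l m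
instance (l : Int) (m : Int) (out : List (List (Int × Int))) : Decidable (Spec_all_alignment l m out) := by unfold Spec_all_alignment; infer_instance

-- ===== CLAIM (what is proved, stated in full; the proofs are below) =====
def Claim_equal_all_alignment : Prop := ∀ (l : Int) (m : Int), Dom_all_alignment l m → Pre_all_alignment l m → Spec_all_alignment l m (all_alignment l m)

-- ===== LEMMAS AND PROOFS =====

-- little-endian base-D digits, k of them (proof-side characterisation)
def pvDigitsLE (D : Nat) : Nat → Nat → List Nat
  | 0, _ => []
  | k+1, n => n % D :: pvDigitsLE D k (n / D)

-- big-endian digit row as Ints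
def pvBig (D k i : Nat) : List Int := ((pvDigitsLE D k i).reverse).map (fun x => (x : Int))

theorem pv_foldl_ignore {α β : Type} (g : α → α) (L : List β) (init : α) :
    L.foldl (fun s _ => g s) init = g^[L.length] init := by
  induction L generalizing init with
  | nil => rfl
  | cons x xs ih => simp [List.foldl_cons, ih, Function.iterate_succ_apply]

theorem pv_foldl_snoc {α β : Type} (g : β → α) (L : List β) (init : List α) :
    L.foldl (fun acc i => acc ++ [g i]) init = init ++ L.map g := by
  induction L generalizing init with
  | nil => simp
  | cons x xs ih => simp [List.foldl_cons, ih]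

theorem pv_range_mul_flat (N D : Nat) :
    List.range (N * D) = (List.range N).flatMap (fun a => (List.range D).map (fun b => a * D + b)) := by
  induction N with
  | zero => simp
  | succ n ih =>
      rw [Nat.succ_mul, List.range_add, List.range_succ, ih]
      simp

theorem pv_inner (d' : Nat) (L : List Int) : ∀ (n : Nat) (acc : List Int),
    L.foldl (fun (st : Int × List Int) _ =>
        (PySem.Int.floordiv st.1 ((d' : Nat) : Int), st.2 ++ [PySem.Int.mod st.1 ((d' : Nat) : Int)]))
      ((n : Int), acc)
    = (((n / d' ^ L.length : Nat) : Int), acc ++ (pvDigitsLE d' L.length n).map (fun x => (x : Int))) := by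
  induction L with
  | nil => intro n acc; simp [pvDigitsLE]
  | cons x xs ih =>
      intro n acc
      rw [List.foldl_cons]
      simp only [PySem.Int.floordiv_natCast, PySem.Int.mod_natCast]
      rw [ih (n / d') (acc ++ [((n % d' : Nat) : Int)])]
      simp [pvDigitsLE, Nat.div_div_eq_div_mul, pow_succ, Nat.mul_comm]

theorem pv_big_ext (d' k a b : Nat) (hd : 1 ≤ d') (hb : b < d') :
    pvBig d' (k + 1) (a * d' + b) = pvBig d' k a ++ [(b : Int)] := by
  have hmod : (a * d' + b) % d' = b := by
    rw [Nat.mul_comm, Nat.mul_add_mod]; exact Nat.mod_eq_of_lt hb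
  have hdiv : (a * d' + b) / d' = a := by
    rw [Nat.mul_comm, Nat.mul_add_div (by omega)]
    rw [Nat.div_eq_of_lt hb]; omega
  simp [pvBig, pvDigitsLE, hmod, hdiv]

theorem pv_rows (d' : Nat) (hd : 1 ≤ d') (k : Nat) :
    (fun rows : List (List Int) =>
        rows.flatMap (fun row => ((List.range d').map (fun b => ((b : Nat) : Int))).map (fun v => row ++ [v])))^[k]
      [[]]
    = (List.range (d' ^ k)).map (pvBig d' k) := by
  induction k with
  | zero => simp [pvBig, pvDigitsLE]
  | succ k ih =>
      rw [Function.iterate_succ_apply', ih, pow_succ, pv_range_mul_flat]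
      rw [List.map_flatMap, List.flatMap_map]
      apply List.flatMap_congr
      intro a _
      rw [List.map_map, List.map_map]
      apply List.map_congr_left
      intro b hb
      simp only [Function.comp_apply]
      exact (pv_big_ext d' k a b hd (List.mem_range.mp hb)).symm

theorem pv_A_eq (l m : Int) (d' M : Nat) (hd : l + 1 = (d' : Int)) (hm : m = (M : Int)) :
    all_alignment l m
    = (List.range (d' ^ M)).map
        (fun i => (PySem.List.pyRange 1 (m + 1) 1).zip (pvBig d' M i)) := by
  have h1l : 1 + l = (d' : Int) := by omega
  have hRange : (1 + l) ^ m.toNat = ((d' ^ M : Nat) : Int) := by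
    rw [h1l, hm]; push_cast; rfl
  unfold all_alignment
  simp only [hRange, hd]
  rw [PySem.List.pyRange_one 0 ((d' ^ M : Nat) : Int) ]
  simp only [Int.sub_zero, Int.toNat_natCast, zero_add]
  rw [List.foldl_map, pv_foldl_snoc]
  rw [List.nil_append]
  apply List.map_congr_left
  intro i _
  have hlen : (PySem.List.pyRange 0 m 1).length = M := by
    rw [PySem.List.length_pyRange_one, hm]; simp
  rw [pv_inner d' (PySem.List.pyRange 0 m 1) i []]
  simp [hlen, pvBig, List.reverse_flatMap, Function.comp_def]

theorem pv_B_eq (l m : Int) (d' M : Nat) (hd : l + 1 = (d' : Int)) (hm : m = (M : Int)) (hd1 : 1 ≤ d') :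
    all_alignment_alt l m
    = (List.range (d' ^ M)).map
        (fun i => (PySem.List.pyRange 1 (m + 1) 1).zip (pvBig d' M i)) := by
  have hvals : PySem.List.pyRange 0 (l + 1) 1 = (List.range d').map (fun b => ((b : Nat) : Int)) := by
    rw [hd, PySem.List.pyRange_one]
    simp
  have hlen : (PySem.List.pyRange 0 m 1).length = M := by
    rw [PySem.List.length_pyRange_one, hm]; simp
  unfold all_alignment_alt
  simp only [hvals]
  rw [pv_foldl_ignore, hlen, pv_rows d' hd1 M]
  rw [List.map_map]
  rfl

theorem pv_alt_empty (l m : Int) (hl : l + 1 ≤ 0) (hm : 0 < m) : all_alignment_alt l m = [] := by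
  unfold all_alignment_alt
  have hvals : PySem.List.pyRange 0 (l + 1) 1 = [] := PySem.List.pyRange_one_eq_nil hl
  simp only [hvals]
  rw [PySem.List.pyRange_one_cons hm, List.foldl_cons]
  have hconst : ∀ L : List Int,
      List.foldl (fun (rows : List (List Int)) (_ : Int) =>
        rows.flatMap (fun _ => ([] : List (List Int)))) [] L = [] := by
    intro L; induction L with
    | nil => rfl
    | cons x xs ih => simpa using ih
  simp [hconst]

theorem pv_A_zero (l : Int) : all_alignment l 0 = [[]] := by
  simp [all_alignment, PySem.List.pyRange_one]

theorem pv_alt_zero (l : Int) : all_alignment_alt l 0 = [[]] := by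
  simp [all_alignment_alt, PySem.List.pyRange_one]

theorem all_alignment_spec : Claim_equal_all_alignment := by
  intro l m _ hpre
  obtain ⟨hm0, hrest⟩ := hpre
  unfold Spec_all_alignment
  obtain ⟨M, hM⟩ := Int.eq_ofNat_of_zero_le hm0
  by_cases hl0 : 0 ≤ l
  · -- d' = (l+1).toNat ≥ 1
    obtain ⟨d', hd'⟩ : ∃ d' : Nat, l + 1 = (d' : Int) := Int.eq_ofNat_of_zero_le (by omega)
    have hd1 : 1 ≤ d' := by omega
    rw [pv_A_eq l m d' M hd' hM, pv_B_eq l m d' M hd' hM hd1]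
  · -- l ≤ -1
    by_cases hm00 : m = 0
    · subst hm00; rw [pv_A_zero, pv_alt_zero]
    · have hmpos : (0 : Int) < m := by omega
      have hMt : m.toNat = M := by rw [hM]; simp
      have hle : (1 + l) ^ m.toNat ≤ 0 := by
        by_cases hl1 : l = -1
        · subst hl1
          rw [hMt]
          simp [zero_pow (by omega : M ≠ 0)]
        · -- l ≤ -2, and Pre_ forces m odd here
          have hodd : m % 2 = 1 := by
            rcases hrest with h | h | h
            · omega
            · omega
            · exact h
          have hModd : Odd M := by
            rw [Nat.odd_iff]; omega
          have hneg : (1 + l : Int) < 0 := by omega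
          rw [hMt]
          exact le_of_lt (hModd.pow_neg hneg)
      have hA : all_alignment l m = [] := by
        simp [all_alignment, PySem.List.pyRange_one_eq_nil hle]
      have hB : all_alignment_alt l m = [] := pv_alt_empty l m (by omega) hmpos
      rw [hA, hB]
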